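-- pv_equiv track=rewrite | github.com/praetorian-inc/nebula | docs/azure-iam-research/scripts/synthesis/generate-index.py | generate_severity_breakdown
-- ===== SOURCE A (Python) =====
-- from typing import Dict, List
--
-- def generate_severity_breakdown(techniques: List[Dict]) -> str:
--     """Generate severity breakdown section."""
--     # Count by severity
--     severity_counts = {}
--     for tech in techniques:
--         severity = tech.get('severity', 'medium')
--         severity_counts[severity] = severity_counts.get(severity, 0) + 1
--
--     breakdown = "## Severity Breakdown\n\n"
--     for severity in ['critical', 'high', 'medium', 'low']:
--         count = severity_counts.get(severity, 0)
--         breakdown += f"- **{severity.upper()}**: {count} techniques\n"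
--     breakdown += "\n"
--
--     return breakdown
-- ===== SOURCE B (Python) =====
-- def generate_severity_breakdown(techniques):
--     """Generate severity breakdown section."""
--     lines = ["## Severity Breakdown\n\n"]
--     for severity in ['critical', 'high', 'medium', 'low']:
--         count = sum(1 for tech in techniques if tech.get('severity', 'medium') == severity)
--         lines.append(f"- **{severity.upper()}**: {count} techniques\n")
--     lines.append("\n")
--     return "".join(lines)
-- ===== Notes on version B (the rewrite author's own statement) =====
-- stated objective: alternative
-- what changed: Replaces the severity-counts dictionary built in one pass with a direct per-severity scan: for each of the four fixed severities the count is computed by a comprehension over the techniques, and the lines are joined at the end.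
import Mathlib
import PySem

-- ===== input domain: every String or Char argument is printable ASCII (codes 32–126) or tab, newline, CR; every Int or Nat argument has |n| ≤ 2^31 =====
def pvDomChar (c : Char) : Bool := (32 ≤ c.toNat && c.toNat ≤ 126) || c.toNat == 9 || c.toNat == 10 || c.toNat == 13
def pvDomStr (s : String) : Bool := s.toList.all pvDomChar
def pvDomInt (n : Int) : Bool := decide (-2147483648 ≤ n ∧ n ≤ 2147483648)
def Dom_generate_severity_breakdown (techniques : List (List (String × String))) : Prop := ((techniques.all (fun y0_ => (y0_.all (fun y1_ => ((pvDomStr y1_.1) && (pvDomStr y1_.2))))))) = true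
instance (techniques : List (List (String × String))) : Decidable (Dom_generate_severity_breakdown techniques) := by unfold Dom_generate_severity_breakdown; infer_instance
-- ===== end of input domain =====

-- B drops A's severity_counts dictionary: it re-scans the technique list once per fixed severity
-- and joins the lines at the end (alternative decomposition, same exact output).

-- ===== PORT A =====
def generate_severity_breakdown (techniques : List (List (String × String))) : String :=
  -- severity_counts built in one pass; severity_counts[severity] = severity_counts.get(severity, 0) + 1
  let counts : PySem.Dict String Int :=
    techniques.foldl (fun d tech =>
      let severity := (PySem.Dict.mk tech).getD "severity" "medium"
      d.insert severity (d.getD severity 0 + 1)) PySem.Dict.empty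
  let breakdown :=
    ["critical", "high", "medium", "low"].foldl (fun b severity =>
      b ++ "- **" ++ PySem.Str.upper severity ++ "**: "
        ++ PySem.Int.toStr (counts.getD severity 0) ++ " techniques\n")
      "## Severity Breakdown\n\n"
  breakdown ++ "\n"

-- ===== PORT B =====
def generate_severity_breakdown_alt (techniques : List (List (String × String))) : String :=
  PySem.Str.join ""
    (["## Severity Breakdown\n\n"]
      ++ (["critical", "high", "medium", "low"].map (fun severity =>
            -- count = sum(1 for tech in techniques if tech.get('severity','medium') == severity)
            let count : Int :=
              (techniques.filter (fun tech =>
                (PySem.Dict.mk tech).getD "severity" "medium" == severity)).length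
            "- **" ++ PySem.Str.upper severity ++ "**: "
              ++ PySem.Int.toStr count ++ " techniques\n"))
      ++ ["\n"])

-- ===== PRECONDITION & SPEC =====
def Spec_generate_severity_breakdown (techniques : List (List (String × String))) (out : String) : Prop := out = generate_severity_breakdown_alt techniques
instance (techniques : List (List (String × String))) (out : String) : Decidable (Spec_generate_severity_breakdown techniques out) := by unfold Spec_generate_severity_breakdown; infer_instance

-- ===== CLAIM (what is proved, stated in full; the proofs are below) =====
def Claim_equal_generate_severity_breakdown : Prop := ∀ (techniques : List (List (String × String))), Dom_generate_severity_breakdown techniques → Spec_generate_severity_breakdown techniques (generate_severity_breakdown techniques)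

-- ===== LEMMAS AND PROOFS =====

-- A's counter dict looked up at key s gives the number of techniques whose severity is s.
theorem counts_getD (techniques : List (List (String × String))) (s : String) :
    (techniques.foldl (fun d tech =>
      let severity := (PySem.Dict.mk tech).getD "severity" "medium"
      d.insert severity (d.getD severity 0 + 1)) (PySem.Dict.empty : PySem.Dict String Int)).getD s 0
    = ((techniques.filter (fun tech =>
        (PySem.Dict.mk tech).getD "severity" "medium" == s)).length : Int) := by
  suffices h : ∀ (d : PySem.Dict String Int),
      (techniques.foldl (fun d tech =>
        let severity := (PySem.Dict.mk tech).getD "severity" "medium"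
        d.insert severity (d.getD severity 0 + 1)) d).getD s 0
      = d.getD s 0 + ((techniques.filter (fun tech =>
          (PySem.Dict.mk tech).getD "severity" "medium" == s)).length : Int) by
    simpa using h PySem.Dict.empty
  induction techniques with
  | nil => intro d; simp
  | cons t l ih =>
    intro d
    simp only [List.foldl_cons, List.filter_cons, ih]
    by_cases hs : (PySem.Dict.mk t).getD "severity" "medium" = s
    · simp [hs, PySem.Dict.getD_insert]; ring
    · simp [hs, PySem.Dict.getD_insert, Ne.symm hs]

-- ===== VERDICT (by name: the statement is the Claim_ definition above) =====
theorem generate_severity_breakdown_spec : Claim_equal_generate_severity_breakdown := by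
  intro techniques _
  unfold Spec_generate_severity_breakdown generate_severity_breakdown generate_severity_breakdown_alt
  simp only [List.foldl, List.map, counts_getD, List.cons_append, List.nil_append]
  rw [← String.toList_inj]
  simp [PySem.Str.toList_join, PySem.Str.toList_upper, PySem.Chars.join, String.toList_append,
    PySem.Chars.upper, PySem.Chars.upperChar, List.intercalate, List.intersperse]
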